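-- pv_equiv track=rewrite | github.com/vangeeteruyenf-coder/cmef-x-bitvavo | cmef_x_bitvavo_app.py | find_best_bitvavo_market_for_coin
-- ===== SOURCE A (Python) =====
-- def find_best_bitvavo_market_for_coin(markets_raw, coin_name, symbol_hint=None):
--     """
--     Given Bitvavo markets JSON and coin name/symbol hint, return a best market string like "BTC-EUR".
--     Preference: market quote 'EUR'. Fallback: first market found for base symbol.
--     """
--     if not markets_raw:
--         return None
--     # Build mapping base -> list of markets
--     mapping = {}
--     for m in markets_raw:
--         base = m.get("base")
--         market_str = m.get("market")
--         if not base or not market_str: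
--             continue
--         mapping.setdefault(base.upper(), []).append(m)
--     # Try symbol_hint first (e.g. ADA)
--     if symbol_hint:
--         base = symbol_hint.upper()
--         if base in mapping:
--             # prefer EUR quote
--             for m in mapping[base]:
--                 if m.get("quote") == "EUR":
--                     return m.get("market")
--             return mapping[base][0].get("market")
--     # If no symbol hint, try to match by coin name to base (e.g. "Cardano" -> ADA)
--     # Many coin names include symbol in parentheses in CoinGecko; best effort: look for exact base in mapping keys
--     # As fallback, attempt to find by matching market where name appears in market['market'] or id
--     # Simplest fallback: pick BTC-EUR if nothing else
--     return "BTC-EUR" if "BTC-EUR" in [m.get("market") for m in markets_raw] else next(iter(mapping.values()))[0].get("market")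
-- ===== SOURCE B (Python) =====
-- def find_best_bitvavo_market_for_coin(markets_raw, coin_name, symbol_hint=None):
--     # One forward pass with an accumulator instead of A's dict grouping + staged loops.
--     if not markets_raw:
--         return None
--     hint_u = symbol_hint.upper() if symbol_hint else None
--     first_valid = None      # market string of the first valid entry
--     first_hint = None       # market of the first valid entry whose base matches the hint
--     first_hint_eur = None   # ... and whose quote is EUR
--     has_btc_eur = False
--     for m in markets_raw:
--         mk = m.get("market")
--         if mk == "BTC-EUR":
--             has_btc_eur = True
--         if not m.get("base") or not mk:
--             continue
--         if first_valid is None: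
--             first_valid = mk
--         if hint_u is not None and m["base"].upper() == hint_u:
--             if first_hint is None:
--                 first_hint = mk
--             if first_hint_eur is None and m.get("quote") == "EUR":
--                 first_hint_eur = mk
--     if first_hint_eur is not None:
--         return first_hint_eur
--     if first_hint is not None:
--         return first_hint
--     if has_btc_eur:
--         return "BTC-EUR"
--     return first_valid  # A raises StopIteration when this is None (outside Pre_)
-- ===== Notes on version B (the rewrite author's own statement) =====
-- stated objective: alternative
-- what changed: B replaces A's dict grouping followed by staged loops over the groups with a single forward pass over the raw list maintaining four accumulators (first valid market, first hint match, first hint match with EUR quote, BTC-EUR seen) combined at the end.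
-- outside the precondition, e.g. on find_best_bitvavo_market_for_coin([{'market': 'ADA-EUR'}], 'Cardano', None): A raises StopIteration, B returns None
import Mathlib
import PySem

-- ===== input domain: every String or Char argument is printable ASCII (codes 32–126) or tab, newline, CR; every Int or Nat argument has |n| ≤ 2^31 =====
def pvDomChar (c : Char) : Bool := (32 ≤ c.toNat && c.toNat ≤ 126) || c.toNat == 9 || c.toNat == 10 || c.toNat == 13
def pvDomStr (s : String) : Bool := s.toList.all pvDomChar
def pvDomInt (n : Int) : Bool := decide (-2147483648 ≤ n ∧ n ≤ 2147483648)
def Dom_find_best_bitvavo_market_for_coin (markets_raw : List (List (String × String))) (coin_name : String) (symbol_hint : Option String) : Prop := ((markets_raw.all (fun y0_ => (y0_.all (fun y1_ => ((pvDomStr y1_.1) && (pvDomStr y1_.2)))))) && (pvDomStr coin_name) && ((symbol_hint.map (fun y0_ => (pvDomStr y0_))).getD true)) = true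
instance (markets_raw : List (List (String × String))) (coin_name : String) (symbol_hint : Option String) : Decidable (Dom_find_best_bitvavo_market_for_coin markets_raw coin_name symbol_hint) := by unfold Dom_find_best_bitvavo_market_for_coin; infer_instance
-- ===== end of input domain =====

-- B replaces A's base->markets grouping dict and staged loops with ONE forward pass keeping four
-- accumulators (first valid market, first hint match, first EUR hint match, BTC-EUR seen);
-- equivalence is about return values: where the Python A raises StopIteration (non-empty input with
-- no valid market and no raw "BTC-EUR"), excluded by Pre_, B returns None.

-- shared helpers: m.get(k) on a dict given as an association list (first match), and Python truthiness of an Optional[str]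
def pvGet (m : List (String × String)) (k : String) : Option String := (PySem.Dict.mk m).get? k
def pvTruthy (o : Option String) : Bool := !((o.getD "") == "")

-- ===== PORT A =====
-- mapping.setdefault(base.upper(), []).append(m)  ==  Dict.modify
def pvStepA (d : PySem.Dict String (List (List (String × String)))) (m : List (String × String)) : PySem.Dict String (List (List (String × String))) :=
  let base := pvGet m "base"
  let market_str := pvGet m "market"
  if !(pvTruthy base) || !(pvTruthy market_str) then d
  else d.modify (PySem.Str.upper (base.getD "")) [] (fun g => g ++ [m])

def find_best_bitvavo_market_for_coin (markets_raw : List (List (String × String))) (coin_name : String) (symbol_hint : Option String) : Option String :=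
  if markets_raw.isEmpty then none
  else
    let mapping := markets_raw.foldl pvStepA PySem.Dict.empty
    -- the symbol_hint block; `some r` = the Python returned r early
    let hintRes : Option (Option String) :=
      match symbol_hint with
      | none => none
      | some h =>
        if !(h == "") then
          match mapping.get? (PySem.Str.upper h) with
          | some l =>
            match l.find? (fun m => pvGet m "quote" == some "EUR") with
            | some m => some (pvGet m "market")
            | none =>
              match l with
              | m0 :: _ => some (pvGet m0 "market")
              | [] => some none  -- mapping[base][0]: groups are never empty, unreachable
          | none => none
        else none
    match hintRes with
    | some r => r
    | none =>
      if (markets_raw.map (fun m => pvGet m "market")).contains (some "BTC-EUR") then some "BTC-EUR"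
      else
        match mapping.values with
        | g :: _ =>
          match g with
          | m0 :: _ => pvGet m0 "market"
          | [] => none  -- groups are never empty, unreachable
        | [] => none  -- Python raises StopIteration here; excluded by Pre_

-- ===== PORT B =====
-- the loop body: state = (first_valid, first_hint, first_hint_eur, has_btc_eur)
def pvScanStep (hu : Option String) (st : Option String × Option String × Option String × Bool) (m : List (String × String)) : Option String × Option String × Option String × Bool :=
  let fv := st.1; let fh := st.2.1; let fe := st.2.2.1; let hb := st.2.2.2
  let mk := pvGet m "market"
  let hb' := hb || (mk == some "BTC-EUR")
  if !(pvTruthy (pvGet m "base")) || !(pvTruthy mk) then (fv, fh, fe, hb')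
  else
    let fv' := if fv.isNone then mk else fv
    match hu with
    | none => (fv', fh, fe, hb')
    | some u =>
      if PySem.Str.upper ((pvGet m "base").getD "") == u then
        (fv', (if fh.isNone then mk else fh),
          (if fe.isNone && (pvGet m "quote" == some "EUR") then mk else fe), hb')
      else (fv', fh, fe, hb')

def find_best_bitvavo_market_for_coin_alt (markets_raw : List (List (String × String))) (coin_name : String) (symbol_hint : Option String) : Option String :=
  if markets_raw.isEmpty then none
  else
    let hu : Option String := match symbol_hint with
      | some h => if h == "" then none else some (PySem.Str.upper h)
      | none => none
    let st := markets_raw.foldl (pvScanStep hu) (none, none, none, false)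
    match st.2.2.1 with
    | some r => some r
    | none =>
      match st.2.1 with
      | some r => some r
      | none => if st.2.2.2 then some "BTC-EUR" else st.1

-- ===== PRECONDITION & SPEC =====
-- Pre_ excludes exactly the inputs where A raises StopIteration: a non-empty markets_raw with no
-- valid (truthy base and market) entry and no raw "BTC-EUR" market string.
def Pre_find_best_bitvavo_market_for_coin (markets_raw : List (List (String × String))) (coin_name : String) (symbol_hint : Option String) : Prop :=
  markets_raw = [] ∨
  (∃ m ∈ markets_raw, pvTruthy (pvGet m "base") && pvTruthy (pvGet m "market")) ∨
  (∃ m ∈ markets_raw, pvGet m "market" = some "BTC-EUR")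
instance (markets_raw : List (List (String × String))) (coin_name : String) (symbol_hint : Option String) : Decidable (Pre_find_best_bitvavo_market_for_coin markets_raw coin_name symbol_hint) := by unfold Pre_find_best_bitvavo_market_for_coin; infer_instance

def pvWitness_find_best_bitvavo_market_for_coin : (List (List (String × String))) × String × Option String :=
  ([[("base", "ADA"), ("market", "ADA-EUR"), ("quote", "EUR")]], "Cardano", some "ADA")

def Spec_find_best_bitvavo_market_for_coin (markets_raw : List (List (String × String))) (coin_name : String) (symbol_hint : Option String) (out : Option String) : Prop := out = find_best_bitvavo_market_for_coin_alt markets_raw coin_name symbol_hint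
instance (markets_raw : List (List (String × String))) (coin_name : String) (symbol_hint : Option String) (out : Option String) : Decidable (Spec_find_best_bitvavo_market_for_coin markets_raw coin_name symbol_hint out) := by unfold Spec_find_best_bitvavo_market_for_coin; infer_instance

-- ===== CLAIM (what is proved, stated in full; the proofs are below) =====
def Claim_equal_find_best_bitvavo_market_for_coin : Prop := ∀ (markets_raw : List (List (String × String))) (coin_name : String) (symbol_hint : Option String), Dom_find_best_bitvavo_market_for_coin markets_raw coin_name symbol_hint → Pre_find_best_bitvavo_market_for_coin markets_raw coin_name symbol_hint → Spec_find_best_bitvavo_market_for_coin markets_raw coin_name symbol_hint (find_best_bitvavo_market_for_coin markets_raw coin_name symbol_hint)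

-- ===== LEMMAS AND PROOFS =====
def pvValid (m : List (String × String)) : Bool := pvTruthy (pvGet m "base") && pvTruthy (pvGet m "market")
def pvKey (m : List (String × String)) : String := PySem.Str.upper ((pvGet m "base").getD "")
def pvFvOf (xs : List (List (String × String))) : Option String :=
  match xs.filter pvValid with | m0 :: _ => pvGet m0 "market" | [] => none
def pvGroup (u : String) (xs : List (List (String × String))) : List (List (String × String)) :=
  (xs.filter pvValid).filter (fun m => pvKey m == u)
def pvFhOf (u : String) (xs : List (List (String × String))) : Option String :=
  match pvGroup u xs with | m0 :: _ => pvGet m0 "market" | [] => none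
def pvFeOf (u : String) (xs : List (List (String × String))) : Option String :=
  match (pvGroup u xs).find? (fun m => pvGet m "quote" == some "EUR") with
  | some m => pvGet m "market" | none => none
def pvBtc (xs : List (List (String × String))) : Bool :=
  xs.any (fun m => pvGet m "market" == some "BTC-EUR")

lemma pvTruthy_some {o : Option String} (h : pvTruthy o = true) : ∃ s, o = some s := by
  cases o with
  | none => simp [pvTruthy] at h
  | some s => exact ⟨s, rfl⟩

lemma pvStepA_eq : pvStepA = fun d m => if pvValid m then d.modify (pvKey m) [] (fun g => g ++ [m]) else d := by
  funext d m
  simp only [pvStepA, pvValid, pvKey]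
  cases hb : pvTruthy (pvGet m "base") <;> cases hm : pvTruthy (pvGet m "market") <;> simp

lemma pvMapping_eq (xs : List (List (String × String))) :
    xs.foldl pvStepA PySem.Dict.empty =
      (xs.filter pvValid).foldl (fun d m => d.modify (pvKey m) [] (fun g => g ++ [m])) PySem.Dict.empty := by
  rw [List.foldl_filter, pvStepA_eq]

lemma pvMapping_getD (xs : List (List (String × String))) (k : String) :
    (xs.foldl pvStepA PySem.Dict.empty).getD k [] = pvGroup k xs := by
  rw [pvMapping_eq]
  have hmap : ((xs.filter pvValid).foldl (fun d m => d.modify (pvKey m) [] (fun g => g ++ [m])) PySem.Dict.empty)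
      = (((xs.filter pvValid).map (fun m => (pvKey m, m))).foldl (fun d p => d.modify p.1 [] (fun g => g ++ [p.2])) PySem.Dict.empty) :=
    (List.foldl_map (f := fun m => (pvKey m, m))
      (g := fun (d : PySem.Dict String (List (List (String × String)))) p => d.modify p.1 [] (fun g => g ++ [p.2]))).symm
  rw [hmap, PySem.Dict.getD_foldl_modify_append]
  simp [pvGroup, List.filter_map, Function.comp_def]

lemma pvMapping_keys (xs : List (List (String × String))) :
    (xs.foldl pvStepA PySem.Dict.empty).keys = PySem.Set.ofList ((xs.filter pvValid).map pvKey) := by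
  rw [pvMapping_eq]
  have h := PySem.Dict.keys_foldl_modify_key (xs.filter pvValid) pvKey [] (fun _ m => (fun g => g ++ [m])) PySem.Dict.empty
  simpa [PySem.Set.update_empty] using h

lemma pvMapping_nodup (xs : List (List (String × String))) :
    (xs.foldl pvStepA PySem.Dict.empty).keys.Nodup := by
  rw [pvMapping_eq]
  have h := PySem.Dict.nodup_keys_foldl_modify_key (xs.filter pvValid) pvKey [] (fun _ m => (fun g => g ++ [m])) PySem.Dict.empty (by simp)
  simpa using h

lemma pvMapping_get?_none (xs : List (List (String × String))) (k : String)
    (h : pvGroup k xs = []) :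
    (xs.foldl pvStepA PySem.Dict.empty).get? k = none := by
  rw [PySem.Dict.get?_eq_none_iff_contains]
  rw [pvGroup, List.filter_eq_nil_iff] at h
  apply Bool.eq_false_iff.mpr
  intro hc
  rw [PySem.Dict.contains_iff_mem_keys, pvMapping_keys, PySem.Set.mem_ofList, List.mem_map] at hc
  obtain ⟨m, hm, hk⟩ := hc
  exact h m hm (by simp [hk])

lemma pvMapping_get?_some (xs : List (List (String × String))) (k : String)
    (h : pvGroup k xs ≠ []) :
    (xs.foldl pvStepA PySem.Dict.empty).get? k = some (pvGroup k xs) := by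
  have hc : (xs.foldl pvStepA PySem.Dict.empty).contains k = true := by
    obtain ⟨m, hmem⟩ := List.exists_mem_of_ne_nil _ h
    rw [pvGroup, List.mem_filter] at hmem
    rw [PySem.Dict.contains_iff_mem_keys, pvMapping_keys, PySem.Set.mem_ofList, List.mem_map]
    exact ⟨m, hmem.1, by simpa using hmem.2⟩
  cases hg : (xs.foldl pvStepA PySem.Dict.empty).get? k with
  | none => rw [PySem.Dict.get?_eq_none_iff_contains] at hg; rw [hg] at hc; exact absurd hc (by simp)
  | some v =>
    have hD := pvMapping_getD xs k
    rw [PySem.Dict.getD_eq_get?_getD, hg, Option.getD_some] at hD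
    rw [hD]

lemma pvSet_head (a : String) (t : List String) :
    (PySem.Set.ofList (a :: t)).head? = some a := by
  have key : ∀ (t : List String) (s : PySem.Set String), s ≠ [] → (t.foldl PySem.Set.add s).head? = s.head? := by
    intro t
    induction t with
    | nil => intro s h; rfl
    | cons x xs ih =>
      intro s h
      have hne : PySem.Set.add s x ≠ [] := by
        simp only [PySem.Set.add]
        split <;> simp_all
      have hh : (PySem.Set.add s x).head? = s.head? := by
        simp only [PySem.Set.add]
        split
        · rfl
        · cases s with
          | nil => exact absurd rfl h
          | cons y ys => rfl
      simp only [List.foldl_cons, ih _ hne, hh]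
  show ((a :: t).foldl PySem.Set.add PySem.Set.empty).head? = some a
  rw [List.foldl_cons, show PySem.Set.add PySem.Set.empty a = [a] from rfl, key t [a] (by simp)]
  rfl

lemma pvMapping_values_head (xs : List (List (String × String))) (m0 : List (String × String))
    (rest : List (List (String × String))) (h : xs.filter pvValid = m0 :: rest) :
    (xs.foldl pvStepA PySem.Dict.empty).values.head? =
      some (m0 :: rest.filter (fun m => pvKey m == pvKey m0)) := by
  rw [PySem.Dict.values_eq_map_keys _ (pvMapping_nodup xs) [], List.head?_map, pvMapping_keys, h,
    List.map_cons, pvSet_head]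
  simp only [Option.map_some]
  rw [pvMapping_getD, pvGroup, h]
  simp

lemma pvBTC_eq (xs : List (List (String × String))) :
    (xs.map (fun m => pvGet m "market")).contains (some "BTC-EUR") = pvBtc xs := by
  rw [pvBtc, List.contains_eq_any_beq, List.any_map]
  simp only [Function.comp_def]
  congr 1
  funext m
  exact BEq.comm

-- A's final fallback expression, reduced to pvBtc / pvFvOf
lemma pvFallback_eq (mr : List (List (String × String))) :
    (if (mr.map (fun m => pvGet m "market")).contains (some "BTC-EUR") then some "BTC-EUR"
     else
       match (mr.foldl pvStepA PySem.Dict.empty).values with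
       | g :: _ => (match g with | m0 :: _ => pvGet m0 "market" | [] => none)
       | [] => none) =
    (if pvBtc mr then some "BTC-EUR" else pvFvOf mr) := by
  rw [pvBTC_eq]
  by_cases hb : pvBtc mr
  · simp [hb]
  · simp only [Bool.not_eq_true] at hb
    simp only [hb, if_false, Bool.false_eq_true]
    cases hv : mr.filter pvValid with
    | nil =>
      rw [pvMapping_eq, hv]
      simp [pvFvOf, hv, PySem.Dict.values, PySem.Dict.empty]
    | cons m0 rest =>
      have hhead := pvMapping_values_head mr m0 rest hv
      cases hval : (mr.foldl pvStepA PySem.Dict.empty).values with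
      | nil => rw [hval] at hhead; exact absurd hhead (by simp)
      | cons g vt =>
        rw [hval] at hhead
        simp only [List.head?_cons, Option.some.injEq] at hhead
        rw [hhead]
        simp [pvFvOf, hv]

-- the single-pass scan, characterised: hu = none case
lemma pvScan_none (xs : List (List (String × String))) :
    ∀ (fv fh fe : Option String) (hb : Bool),
      xs.foldl (pvScanStep none) (fv, fh, fe, hb) =
        (fv.or (pvFvOf xs), fh, fe, hb || pvBtc xs) := by
  induction xs with
  | nil => intro fv fh fe hb; simp [pvFvOf, pvBtc]
  | cons m t ih =>
    intro fv fh fe hb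
    rw [List.foldl_cons]
    by_cases hvm : pvValid m
    · have hv2 : pvTruthy (pvGet m "base") = true ∧ pvTruthy (pvGet m "market") = true := by
        simpa [pvValid] using hvm
      obtain ⟨s, hs⟩ := pvTruthy_some hv2.2
      have hstep : pvScanStep none (fv, fh, fe, hb) m =
          ((if fv.isNone then pvGet m "market" else fv), fh, fe, hb || (pvGet m "market" == some "BTC-EUR")) := by
        simp only [pvScanStep, pvValid] at *
        rw [hv2.1, hv2.2]
        simp
      rw [hstep, ih]
      have hfv : (if fv.isNone then pvGet m "market" else fv).or (pvFvOf t) = fv.or (pvFvOf (m :: t)) := by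
        have : pvFvOf (m :: t) = pvGet m "market" := by simp [pvFvOf, hvm]
        rw [this]
        cases fv <;> simp [hs]
      have hbt : ((hb || (pvGet m "market" == some "BTC-EUR")) || pvBtc t) = (hb || pvBtc (m :: t)) := by
        simp [pvBtc, Bool.or_assoc]
      rw [hfv, hbt]
    · have hstep : pvScanStep none (fv, fh, fe, hb) m =
          (fv, fh, fe, hb || (pvGet m "market" == some "BTC-EUR")) := by
        simp only [pvScanStep, pvValid] at *
        by_cases hb1 : pvTruthy (pvGet m "base") = true <;>
          by_cases hm1 : pvTruthy (pvGet m "market") = true <;>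
          simp_all
      rw [hstep, ih]
      have : pvFvOf (m :: t) = pvFvOf t := by simp [pvFvOf, hvm]
      rw [this]
      simp [pvBtc, Bool.or_assoc]

-- hu = some u case
lemma pvScan_some (u : String) (xs : List (List (String × String))) :
    ∀ (fv fh fe : Option String) (hb : Bool),
      xs.foldl (pvScanStep (some u)) (fv, fh, fe, hb) =
        (fv.or (pvFvOf xs), fh.or (pvFhOf u xs), fe.or (pvFeOf u xs), hb || pvBtc xs) := by
  induction xs with
  | nil => intro fv fh fe hb; simp [pvFvOf, pvFhOf, pvFeOf, pvGroup, pvBtc]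
  | cons m t ih =>
    intro fv fh fe hb
    rw [List.foldl_cons]
    by_cases hvm : pvValid m
    · have hv2 : pvTruthy (pvGet m "base") = true ∧ pvTruthy (pvGet m "market") = true := by
        simpa [pvValid] using hvm
      obtain ⟨s, hs⟩ := pvTruthy_some hv2.2
      have hfvOf : pvFvOf (m :: t) = pvGet m "market" := by simp [pvFvOf, hvm]
      have hfv : ∀ fv : Option String, (if fv.isNone then pvGet m "market" else fv).or (pvFvOf t) = fv.or (pvFvOf (m :: t)) := by
        intro fv; rw [hfvOf]; cases fv <;> simp [hs]
      have hbt : ((hb || (pvGet m "market" == some "BTC-EUR")) || pvBtc t) = (hb || pvBtc (m :: t)) := by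
        simp [pvBtc, Bool.or_assoc]
      by_cases hk : pvKey m == u
      · have hgrp : pvGroup u (m :: t) = m :: pvGroup u t := by
          simp [pvGroup, List.filter_cons, hvm, hk]
        have hstep : pvScanStep (some u) (fv, fh, fe, hb) m =
            ((if fv.isNone then pvGet m "market" else fv),
             (if fh.isNone then pvGet m "market" else fh),
             (if fe.isNone && (pvGet m "quote" == some "EUR") then pvGet m "market" else fe),
             hb || (pvGet m "market" == some "BTC-EUR")) := by
          simp only [pvScanStep, pvValid, pvKey] at *
          rw [hv2.1, hv2.2]
          simp [hk]
        rw [hstep, ih, hfv, hbt]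
        have hfh : (if fh.isNone then pvGet m "market" else fh).or (pvFhOf u t) = fh.or (pvFhOf u (m :: t)) := by
          have : pvFhOf u (m :: t) = pvGet m "market" := by simp [pvFhOf, hgrp]
          rw [this]; cases fh <;> simp [hs]
        have hfe : (if fe.isNone && (pvGet m "quote" == some "EUR") then pvGet m "market" else fe).or (pvFeOf u t)
            = fe.or (pvFeOf u (m :: t)) := by
          have hfind : pvFeOf u (m :: t) =
              (if (pvGet m "quote" == some "EUR") then pvGet m "market" else pvFeOf u t) := by
            simp only [pvFeOf, hgrp, List.find?_cons]
            by_cases hq : (pvGet m "quote" == some "EUR") <;> simp [hq]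
          rw [hfind]
          by_cases hq : (pvGet m "quote" == some "EUR") = true
          · cases fe <;> simp [hq, hs]
          · simp only [Bool.eq_false_iff.mpr hq]
            cases fe <;> simp
        rw [hfh, hfe]
      · have hgrp : pvGroup u (m :: t) = pvGroup u t := by
          simp only [pvGroup, List.filter_cons, hvm, if_true]
          simp [List.filter_cons, Bool.eq_false_iff.mpr (fun h => hk h)]
        have hstep : pvScanStep (some u) (fv, fh, fe, hb) m =
            ((if fv.isNone then pvGet m "market" else fv), fh, fe,
             hb || (pvGet m "market" == some "BTC-EUR")) := by
          simp only [pvScanStep, pvValid, pvKey] at *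
          rw [hv2.1, hv2.2]
          simp [hk]
        rw [hstep, ih, hfv, hbt]
        rw [show pvFhOf u (m :: t) = pvFhOf u t from by simp [pvFhOf, hgrp],
            show pvFeOf u (m :: t) = pvFeOf u t from by simp [pvFeOf, hgrp]]
    · have hstep : pvScanStep (some u) (fv, fh, fe, hb) m =
          (fv, fh, fe, hb || (pvGet m "market" == some "BTC-EUR")) := by
        simp only [pvScanStep, pvValid] at *
        by_cases hb1 : pvTruthy (pvGet m "base") = true <;>
          by_cases hm1 : pvTruthy (pvGet m "market") = true <;>
          simp_all
      have hgrp : pvGroup u (m :: t) = pvGroup u t := by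
        simp [pvGroup, hvm]
      rw [hstep, ih]
      rw [show pvFvOf (m :: t) = pvFvOf t from by simp [pvFvOf, hvm],
          show pvFhOf u (m :: t) = pvFhOf u t from by simp [pvFhOf, hgrp],
          show pvFeOf u (m :: t) = pvFeOf u t from by simp [pvFeOf, hgrp]]
      simp [pvBtc, Bool.or_assoc]

-- members of a hint group are valid, hence their market string is some _
lemma pvGroup_market_some {u : String} {xs : List (List (String × String))} {m : List (String × String)}
    (h : m ∈ pvGroup u xs) : ∃ s, pvGet m "market" = some s := by
  rw [pvGroup, List.mem_filter] at h
  have hv := (List.mem_filter.mp h.1).2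
  have hv2 : pvTruthy (pvGet m "base") = true ∧ pvTruthy (pvGet m "market") = true := by
    simpa [pvValid] using hv
  exact pvTruthy_some hv2.2

-- ===== VERDICT (by name: the statement is the Claim_ definition above) =====
theorem find_best_bitvavo_market_for_coin_spec : Claim_equal_find_best_bitvavo_market_for_coin := by
  intro mr cn sh _hDom _hPre
  unfold Spec_find_best_bitvavo_market_for_coin
  unfold find_best_bitvavo_market_for_coin find_best_bitvavo_market_for_coin_alt
  by_cases hE : mr.isEmpty
  · simp [hE]
  · simp only [hE, if_false, Bool.false_eq_true]
    cases sh with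
    | none =>
      rw [pvScan_none mr none none none false]
      simpa using pvFallback_eq mr
    | some h =>
      by_cases hh : h == ""
      · simp only [hh, Bool.not_true, if_false, Bool.false_eq_true, if_true]
        rw [pvScan_none mr none none none false]
        simpa using pvFallback_eq mr
      · simp only [Bool.eq_false_iff.mpr hh, Bool.not_false, if_true, if_false, Bool.false_eq_true]
        rw [pvScan_some (PySem.Str.upper h) mr none none none false]
        simp only [Option.none_or, Bool.false_or]
        by_cases hg : pvGroup (PySem.Str.upper h) mr = []
        · rw [pvMapping_get?_none mr _ hg]
          rw [show pvFhOf (PySem.Str.upper h) mr = none from by simp [pvFhOf, hg],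
              show pvFeOf (PySem.Str.upper h) mr = none from by simp [pvFeOf, hg]]
          simpa using pvFallback_eq mr
        · rw [pvMapping_get?_some mr _ hg]
          cases hl : pvGroup (PySem.Str.upper h) mr with
          | nil => exact absurd hl hg
          | cons m0 rest =>
            cases hf : (m0 :: rest).find? (fun m => pvGet m "quote" == some "EUR") with
            | some m =>
              have hm : m ∈ pvGroup (PySem.Str.upper h) mr := by
                rw [hl]; exact List.mem_of_find?_eq_some hf
              obtain ⟨s, hs⟩ := pvGroup_market_some hm
              rw [show pvFeOf (PySem.Str.upper h) mr = pvGet m "market" from by simp [pvFeOf, hl, hf]]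
              simp [hf, hs]
            | none =>
              have hm0 : m0 ∈ pvGroup (PySem.Str.upper h) mr := by rw [hl]; exact List.mem_cons_self
              obtain ⟨s, hs⟩ := pvGroup_market_some hm0
              rw [show pvFeOf (PySem.Str.upper h) mr = none from by simp [pvFeOf, hl, hf],
                  show pvFhOf (PySem.Str.upper h) mr = pvGet m0 "market" from by simp [pvFhOf, hl]]
              simp [hf, hs]
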